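-- pv_equiv track=rewrite | github.com/AliceSFC/TestTom | planner/rules.py | classify_body_region
-- ===== SOURCE A (Python) =====
-- BODY_REGION_KEYWORDS = {
--     "front": {"front_end", "shoulders"},
--     "core": {"core", "stabilization", "low_back"},
--     "rear": {"rear_end", "rear_end_awareness", "hip_flexors"},
-- }
--
-- def _tokenize(raw: str) -> set[str]:
--     """Split comma-separated string into normalized token set."""
--     if not isinstance(raw, str):
--         return set()
--     return {t.strip().lower() for t in raw.split(",") if t.strip()}
--
-- def classify_body_region(focus_str: str) -> set[str]:
--     """Classify exercise into front / core / rear body regions."""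
--     tokens = _tokenize(focus_str)
--     regions = set()
--     for region, keywords in BODY_REGION_KEYWORDS.items():
--         if tokens & keywords:
--             regions.add(region)
--     if "full_body" in tokens:
--         regions = {"front", "core", "rear"}
--     return regions or {"core"}
-- ===== SOURCE B (Python) =====
-- BODY_REGION_KEYWORDS = {
--     "front": {"front_end", "shoulders"},
--     "core": {"core", "stabilization", "low_back"},
--     "rear": {"rear_end", "rear_end_awareness", "hip_flexors"},
-- }
--
-- REGION_OF = {kw: region for region, kws in BODY_REGION_KEYWORDS.items() for kw in kws}
--
-- def classify_body_region(focus_str):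
--     """Single streaming pass over the raw parts with an inverted keyword index."""
--     hit = {"front": False, "core": False, "rear": False}
--     full = False
--     for part in focus_str.split(","):
--         t = part.strip().lower()
--         if t == "full_body":
--             full = True
--         elif t in REGION_OF:
--             hit[REGION_OF[t]] = True
--     if full:
--         return {"front", "core", "rear"}
--     regions = {r for r, h in hit.items() if h}
--     return regions or {"core"}
-- ===== Notes on version B (the rewrite author's own statement) =====
-- stated objective: alternative
-- what changed: B inverts BODY_REGION_KEYWORDS into a keyword-to-region index once and classifies in a single streaming pass over the raw comma-separated parts, setting per-region flags (plus a full_body flag) as tokens are seen, instead of A's building a token set and intersecting it with each region's keyword set.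
import Mathlib
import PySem

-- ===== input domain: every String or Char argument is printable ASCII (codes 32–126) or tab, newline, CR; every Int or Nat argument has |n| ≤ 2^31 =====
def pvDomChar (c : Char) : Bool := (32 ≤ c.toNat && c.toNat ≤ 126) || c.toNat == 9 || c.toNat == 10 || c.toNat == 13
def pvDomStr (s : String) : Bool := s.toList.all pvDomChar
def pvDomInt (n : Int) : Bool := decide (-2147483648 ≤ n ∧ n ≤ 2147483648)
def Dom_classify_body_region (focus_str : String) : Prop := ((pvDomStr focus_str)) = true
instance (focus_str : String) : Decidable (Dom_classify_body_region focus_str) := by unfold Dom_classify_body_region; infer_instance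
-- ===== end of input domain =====

-- B inverts the region→keywords table into one keyword→region index and classifies in a single
-- streaming pass over the raw comma-separated parts, instead of A's token set intersected with
-- each region's keyword set (objective: alternative; same observable return value).

-- ===== PORT A =====
def bodyRegionKeywords : List (String × PySem.Set String) :=
  [("front", PySem.Set.ofList ["front_end", "shoulders"]),
   ("core", PySem.Set.ofList ["core", "stabilization", "low_back"]),
   ("rear", PySem.Set.ofList ["rear_end", "rear_end_awareness", "hip_flexors"])]

def tokenizeA (raw : String) : PySem.Set String :=
  PySem.Set.ofList
    ((((PySem.Str.split? raw ",").getD []).filter (fun t => ¬ PySem.Str.strip t = "")).map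
      (fun t => PySem.Str.lower (PySem.Str.strip t)))

def classify_body_region (focus_str : String) : List String :=
  let tokens := tokenizeA focus_str
  let regions := bodyRegionKeywords.foldl
    (fun regions rk => if ¬ PySem.Set.inter tokens rk.2 = [] then PySem.Set.add regions rk.1 else regions)
    PySem.Set.empty
  let regions := if PySem.Set.contains tokens "full_body" then PySem.Set.ofList ["front", "core", "rear"] else regions
  if regions = [] then PySem.Set.ofList ["core"] else regions

-- ===== PORT B =====
def regionOf : PySem.Dict String String :=
  PySem.Dict.ofList
    [("front_end", "front"), ("shoulders", "front"),
     ("core", "core"), ("stabilization", "core"), ("low_back", "core"),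
     ("rear_end", "rear"), ("rear_end_awareness", "rear"), ("hip_flexors", "rear")]

-- body of B's for-loop, one comma-separated part at a time
def bStep (st : PySem.Dict String Bool × Bool) (part : String) : PySem.Dict String Bool × Bool :=
  let t := PySem.Str.lower (PySem.Str.strip part)
  if t = "full_body" then (st.1, true)
  else
    match PySem.Dict.get? regionOf t with
    | some r => (PySem.Dict.insert st.1 r true, st.2)
    | none => st

def classify_body_region_alt (focus_str : String) : List String :=
  let st : PySem.Dict String Bool × Bool := ((PySem.Str.split? focus_str ",").getD []).foldl bStep
    (PySem.Dict.ofList [("front", false), ("core", false), ("rear", false)], false)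
  if st.2 then PySem.Set.ofList ["front", "core", "rear"]
  else
    let regions := PySem.Set.ofList ((st.1.items.filter (fun p => p.2)).map (fun p => p.1))
    if regions = [] then PySem.Set.ofList ["core"] else regions

-- ===== PRECONDITION & SPEC =====
def Spec_classify_body_region (focus_str : String) (out : List String) : Prop := out = classify_body_region_alt focus_str
instance (focus_str : String) (out : List String) : Decidable (Spec_classify_body_region focus_str out) := by unfold Spec_classify_body_region; infer_instance

-- ===== CLAIM (what is proved, stated in full; the proofs are below) =====
def Claim_equal_classify_body_region : Prop := ∀ (focus_str : String), Dom_classify_body_region focus_str → Spec_classify_body_region focus_str (classify_body_region focus_str)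

-- ===== LEMMAS AND PROOFS =====

-- B's flag dict, with the three flags abstracted
def hitD (a b c : Bool) : PySem.Dict String Bool :=
  PySem.Dict.ofList [("front", a), ("core", b), ("rear", c)]

-- token normalization shared by both programs
def normTok (t : String) : String := PySem.Str.lower (PySem.Str.strip t)

def pFull (t : String) : Bool := normTok t == "full_body"
def pF (t : String) : Bool := PySem.Dict.get? regionOf (normTok t) == some "front"
def pC (t : String) : Bool := PySem.Dict.get? regionOf (normTok t) == some "core"
def pR (t : String) : Bool := PySem.Dict.get? regionOf (normTok t) == some "rear"

lemma regionOf_eq : regionOf = PySem.Dict.mk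
    [("front_end", "front"), ("shoulders", "front"),
     ("core", "core"), ("stabilization", "core"), ("low_back", "core"),
     ("rear_end", "rear"), ("rear_end_awareness", "rear"), ("hip_flexors", "rear")] := by decide

lemma get?_regionOf_some (s r : String) :
    (PySem.Dict.get? regionOf s = some r) ↔
      ((r = "front" ∧ (s = "front_end" ∨ s = "shoulders")) ∨
       (r = "core" ∧ (s = "core" ∨ s = "stabilization" ∨ s = "low_back")) ∨
       (r = "rear" ∧ (s = "rear_end" ∨ s = "rear_end_awareness" ∨ s = "hip_flexors"))) := by
  rw [regionOf_eq]
  simp only [PySem.Dict.get?_mk_cons, beq_iff_eq]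
  split_ifs with h1 h2 h3 h4 h5 h6 h7 h8 <;>
    simp_all [PySem.Dict.get?, eq_comm]

lemma insert_hitD_front (a b c : Bool) : PySem.Dict.insert (hitD a b c) "front" true = hitD true b c := by
  simp [hitD, PySem.Dict.insert, PySem.Dict.ofList, PySem.Dict.update, PySem.Dict.contains, PySem.Dict.empty]
lemma insert_hitD_core (a b c : Bool) : PySem.Dict.insert (hitD a b c) "core" true = hitD a true c := by
  simp [hitD, PySem.Dict.insert, PySem.Dict.ofList, PySem.Dict.update, PySem.Dict.contains, PySem.Dict.empty]
lemma insert_hitD_rear (a b c : Bool) : PySem.Dict.insert (hitD a b c) "rear" true = hitD a b true := by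
  simp [hitD, PySem.Dict.insert, PySem.Dict.ofList, PySem.Dict.update, PySem.Dict.contains, PySem.Dict.empty]

lemma bStep_eq (x : String) (a b c fl : Bool) :
    bStep (hitD a b c, fl) x = (hitD (a || pF x) (b || pC x) (c || pR x), fl || pFull x) := by
  rw [bStep]
  by_cases hfb : normTok x = "full_body"
  · have h1 : pF x = false := by rw [pF, hfb]; decide
    have h2 : pC x = false := by rw [pC, hfb]; decide
    have h3 : pR x = false := by rw [pR, hfb]; decide
    have h4 : pFull x = true := by rw [pFull, hfb]; decide
    have hfb' : PySem.Str.lower (PySem.Str.strip x) = "full_body" := hfb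
    simp [hfb', h1, h2, h3, h4]
  · have h4 : pFull x = false := by rw [pFull]; simpa using hfb
    have hfb' : ¬ PySem.Str.lower (PySem.Str.strip x) = "full_body" := hfb
    rw [if_neg hfb']
    rcases hg : PySem.Dict.get? regionOf (PySem.Str.lower (PySem.Str.strip x)) with _ | r
    · have hg' : PySem.Dict.get? regionOf (normTok x) = none := hg
      have h1 : pF x = false := by rw [pF, hg']; rfl
      have h2 : pC x = false := by rw [pC, hg']; rfl
      have h3 : pR x = false := by rw [pR, hg']; rfl
      simp [h1, h2, h3, h4]
    · have hg' : PySem.Dict.get? regionOf (normTok x) = some r := hg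
      have hr := (get?_regionOf_some _ _).1 hg'
      rcases hr with ⟨hr, -⟩ | ⟨hr, -⟩ | ⟨hr, -⟩ <;> subst hr <;>
        simp [pF, pC, pR, hg', h4, insert_hitD_front, insert_hitD_core, insert_hitD_rear]

lemma B_fold (l : List String) (a b c fl : Bool) :
    l.foldl bStep (hitD a b c, fl)
    = (hitD (a || l.any pF) (b || l.any pC) (c || l.any pR), fl || l.any pFull) := by
  induction l generalizing a b c fl with
  | nil => simp
  | cons x xs ih =>
    rw [List.foldl_cons, bStep_eq, ih]
    simp [Bool.or_assoc, List.any_cons]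

lemma normTok_ne_empty (t : String) (x : String) (h : normTok t = x) (hx : ¬ x = "") :
    ¬ PySem.Str.strip t = "" := by
  intro hs
  apply hx
  rw [← h]
  unfold normTok
  rw [hs]
  decide

lemma mem_tokenizeA (raw x : String) (hx : ¬ x = "") :
    x ∈ tokenizeA raw ↔ ∃ t ∈ (PySem.Str.split? raw ",").getD [], normTok t = x := by
  rw [tokenizeA, PySem.Set.mem_ofList]
  simp only [List.mem_map, List.mem_filter]
  constructor
  · rintro ⟨t, ⟨ht, -⟩, hn⟩; exact ⟨t, ht, hn⟩
  · rintro ⟨t, ht, hn⟩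
    refine ⟨t, ⟨ht, ?_⟩, hn⟩
    have := normTok_ne_empty t x hn hx
    simpa using this

lemma full_iff (raw : String) :
    (PySem.Set.contains (tokenizeA raw) "full_body" = true)
      ↔ (((PySem.Str.split? raw ",").getD []).any pFull = true) := by
  rw [PySem.Set.contains_iff, mem_tokenizeA raw "full_body" (by decide)]
  simp only [List.any_eq_true, pFull, beq_iff_eq]

lemma region_iff (raw : String) (r : String) (ks : List String)
    (hks : ∀ x, x ∈ ks ↔ PySem.Dict.get? regionOf x = some r)
    (hne : ∀ x ∈ ks, ¬ x = "") :
    (¬ PySem.Set.inter (tokenizeA raw) (PySem.Set.ofList ks) = [])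
      ↔ (((PySem.Str.split? raw ",").getD []).any
          (fun t => PySem.Dict.get? regionOf (normTok t) == some r) = true) := by
  rw [PySem.Set.inter]
  simp only [List.filter_eq_nil_iff, not_forall, not_not, exists_prop]
  constructor
  · rintro ⟨x, hx, hc⟩
    simp only [PySem.Set.contains_eq_listContains, List.contains_eq_mem, PySem.Set.mem_ofList,
      decide_eq_true_eq] at hc
    have hxk := (hks x).1 hc
    have hxt := (mem_tokenizeA raw x (hne x hc)).1 hx
    rcases hxt with ⟨t, ht, hn⟩
    simp only [List.any_eq_true]
    exact ⟨t, ht, by rw [hn]; simp [hxk]⟩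
  · intro h
    simp only [List.any_eq_true, beq_iff_eq] at h
    rcases h with ⟨t, ht, hg⟩
    have hxk := (hks (normTok t)).2 hg
    refine ⟨normTok t, ?_, ?_⟩
    · exact (mem_tokenizeA raw (normTok t) (hne _ hxk)).2 ⟨t, ht, rfl⟩
    · simp [PySem.Set.contains_eq_listContains, PySem.Set.mem_ofList, hxk]

set_option maxHeartbeats 1600000 in
lemma main_lemma (s : String) : classify_body_region s = classify_body_region_alt s := by
  unfold classify_body_region classify_body_region_alt
  simp only [bodyRegionKeywords, List.foldl_cons, List.foldl_nil]
  rw [show (PySem.Dict.ofList [("front", false), ("core", false), ("rear", false)], false)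
        = (hitD false false false, false) from rfl]
  rw [B_fold]
  have hF := region_iff s "front" ["front_end", "shoulders"]
    (by intro x; rw [get?_regionOf_some]; simp) (by decide)
  have hC := region_iff s "core" ["core", "stabilization", "low_back"]
    (by intro x; rw [get?_regionOf_some]; simp) (by decide)
  have hR := region_iff s "rear" ["rear_end", "rear_end_awareness", "hip_flexors"]
    (by intro x; rw [get?_regionOf_some]; simp) (by decide)
  have hFu := full_iff s
  have hF' := (not_iff_comm.mp hF).symm
  have hC' := (not_iff_comm.mp hC).symm
  have hR' := (not_iff_comm.mp hR).symm
  have e1 : PySem.Set.ofList ["front_end", "shoulders"] = ["front_end", "shoulders"] := by decide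
  have e2 : PySem.Set.ofList ["core", "stabilization", "low_back"] = ["core", "stabilization", "low_back"] := by decide
  have e3 : PySem.Set.ofList ["rear_end", "rear_end_awareness", "hip_flexors"] = ["rear_end", "rear_end_awareness", "hip_flexors"] := by decide
  rw [e1] at hF hF'
  rw [e2] at hC hC'
  rw [e3] at hR hR'
  have hFu' : ("full_body" ∈ tokenizeA s)
      ↔ (((PySem.Str.split? s ",").getD []).any pFull = true) := by
    rw [← PySem.Set.contains_iff]; exact hFu
  set L := (PySem.Str.split? s ",").getD [] with hL
  by_cases h1 : L.any pF = true <;> by_cases h2 : L.any pC = true <;>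
  by_cases h3 : L.any pR = true <;> by_cases h4 : L.any pFull = true <;>
    simp only [pF, pC, pR, pFull, List.any_eq_true, beq_iff_eq] at h1 h2 h3 h4 <;>
    simp [pF, pC, pR, pFull, hF', hC', hR', hFu', h1, h2, h3, h4, eq_false, hitD,
      PySem.Set.add, PySem.Set.ofList, PySem.Set.contains, PySem.Set.empty, PySem.Dict.ofList,
      PySem.Dict.update, PySem.Dict.insert, PySem.Dict.contains, PySem.Dict.empty]

-- ===== VERDICT (by name: the statement is the Claim_ definition above) =====
theorem classify_body_region_spec : Claim_equal_classify_body_region := by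
  intro s _
  unfold Spec_classify_body_region
  exact main_lemma s
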